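-- pv_equiv track=rewrite | github.com/User0332/cryptis | soln.py | solution
-- ===== SOURCE A (Python) =====
-- def solution(houses: list[int], k: int):
-- 	max_sum = 0
--
-- 	for i in range(len(houses)):
-- 		curr_sum = i
--
-- 		for j in range(i+k, len(houses)):
-- 			curr_sum+=solution(houses[j:], k)
--
-- 		if curr_sum > max_sum: max_sum = curr_sum
--
-- 	return max_sum
-- ===== SOURCE B (Python) =====
-- def solution(houses: list[int], k: int):
-- 	# The result of A depends only on len(houses) and k: memoize f(m) = answer
-- 	# for a suffix of length m, with running prefix sums, instead of A's
-- 	# exponential recursion over slices.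
-- 	n = len(houses)
-- 	f = [0]     # f[m] = value for a list of length m
-- 	pref = [0]  # pref[t] = f[1] + ... + f[t]
-- 	for m in range(1, n + 1):
-- 		best = 0
-- 		for i in range(m):
-- 			t = m - i - k
-- 			cand = i + (pref[t] if t > 0 else 0)
-- 			if cand > best:
-- 				best = cand
-- 		f.append(best)
-- 		pref.append(pref[-1] + best)
-- 	return f[n]
-- ===== Notes on version B (the rewrite author's own statement) =====
-- stated objective: faster
-- what changed: A's result depends only on len(houses) and k, so B replaces A's exponential recursion over list slices by a bottom-up DP table over suffix lengths with running prefix sums; Pre_ excludes k <= 0 with a nonempty list, where A recurses on the unchanged list and raises RecursionError (B raises IndexError there).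
import Mathlib
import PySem

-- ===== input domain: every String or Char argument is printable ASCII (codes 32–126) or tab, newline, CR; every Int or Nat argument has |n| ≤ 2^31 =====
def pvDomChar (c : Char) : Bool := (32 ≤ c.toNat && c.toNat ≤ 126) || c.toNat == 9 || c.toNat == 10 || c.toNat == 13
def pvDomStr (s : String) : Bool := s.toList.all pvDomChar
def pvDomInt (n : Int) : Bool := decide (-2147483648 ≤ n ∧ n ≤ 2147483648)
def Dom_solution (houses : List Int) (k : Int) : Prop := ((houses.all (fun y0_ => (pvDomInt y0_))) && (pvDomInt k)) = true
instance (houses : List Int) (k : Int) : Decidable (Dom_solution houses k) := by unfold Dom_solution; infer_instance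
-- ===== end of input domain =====

-- B replaces A's exponential recursion over list slices by a bottom-up DP over
-- suffix lengths with running prefix sums (A's value depends only on len(houses) and k).

-- ===== PORT A =====
-- Fuel-guarded transliteration of A's recursion; the fuel (list length + 1) only
-- makes the recursion total: under Pre_ (k ≥ 1) every recursive call strictly
-- shortens the list, so the 0-fuel branch is never reached.
def solgoA : Nat → List Int → Int → Int
  | 0, _, _ => 0
  | fuel+1, houses, k =>
    let n : Int := houses.length
    (PySem.List.pyRange 0 n 1).foldl (fun max_sum i =>
      let curr_sum := (PySem.List.pyRange (i + k) n 1).foldl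
        (fun cs j => cs + solgoA fuel (PySem.List.slice houses (some j) none) k) i
      if max_sum < curr_sum then curr_sum else max_sum) 0

def solution (houses : List Int) (k : Int) : Int := solgoA (houses.length + 1) houses k

-- ===== PORT B =====
-- one step of B's outer loop: state (f, pref), m the current length
def bStep (k : Int) (st : List Int × List Int) (m : Int) : List Int × List Int :=
  let f := st.1
  let pref := st.2
  let best := (PySem.List.pyRange 0 m 1).foldl (fun best i =>
    let t := m - i - k
    let cand := i + (if 0 < t then PySem.List.pyGetD pref t 0 else 0)
    if best < cand then cand else best) 0
  (f ++ [best], pref ++ [PySem.List.pyGetD pref (-1) 0 + best])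

def solution_alt (houses : List Int) (k : Int) : Int :=
  let n : Int := houses.length
  let st := (PySem.List.pyRange 1 (n + 1) 1).foldl (bStep k) ([0], [0])
  PySem.List.pyGetD st.1 n 0

-- ===== PRECONDITION & SPEC =====
-- Pre_ excludes k ≤ 0 with a nonempty list: there A's inner loop reaches j = 0 and A
-- calls itself on the unchanged list, raising RecursionError (B raises IndexError).
def Pre_solution (houses : List Int) (k : Int) : Prop := 1 ≤ k ∨ houses = []
instance (houses : List Int) (k : Int) : Decidable (Pre_solution houses k) := by
  unfold Pre_solution; infer_instance

def pvWitness_solution : List Int × Int := ([3, 1, 4, 1, 5], 2)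

def Spec_solution (houses : List Int) (k : Int) (out : Int) : Prop := out = solution_alt houses k
instance (houses : List Int) (k : Int) (out : Int) : Decidable (Spec_solution houses k out) := by
  unfold Spec_solution; infer_instance

-- ===== CLAIM (what is proved, stated in full; the proofs are below) =====
def Claim_equal_solution : Prop := ∀ (houses : List Int) (k : Int), Dom_solution houses k → Pre_solution houses k → Spec_solution houses k (solution houses k)

-- ===== LEMMAS AND PROOFS =====

-- the DP table after m outer steps of B
def Tab (k : Int) : Nat → List Int × List Int
  | 0 => ([0], [0])
  | m+1 => bStep k (Tab k m) ((m : Int) + 1)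

-- f-value for a list of length n
def fv (k : Int) (n : Nat) : Int := (Tab k n).1.getD n 0

-- prefix sum f 1 + … + f t
def pS (k : Int) (t : Nat) : Int := ((List.range t).map (fun L => fv k (L + 1))).sum

lemma fold_eq_tab (k : Int) (n : Nat) :
    (PySem.List.pyRange 1 ((n : Int) + 1) 1).foldl (bStep k) ([0], [0]) = Tab k n := by
  induction n with
  | zero => simp [PySem.List.pyRange_one_eq_nil, Tab]
  | succ m ih =>
    rw [show ((m + 1 : Nat) : Int) + 1 = ((m : Int) + 1) + 1 by push_cast; ring,
        PySem.List.pyRange_one_succ_right (by omega), List.foldl_append, ih]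
    simp [Tab]

lemma tab_len (k : Int) (n : Nat) :
    (Tab k n).1.length = n + 1 ∧ (Tab k n).2.length = n + 1 := by
  induction n with
  | zero => simp [Tab]
  | succ m ih => simp [Tab, bStep, ih.1, ih.2]

-- one step of the table, with the new best value abstracted
lemma tab_succ (k : Int) (m : Nat) :
    ∃ B : Int, (Tab k (m+1)).1 = (Tab k m).1 ++ [B] ∧
      (Tab k (m+1)).2 = (Tab k m).2 ++ [PySem.List.pyGetD (Tab k m).2 (-1) 0 + B] ∧
      B = fv k (m + 1) := by
  refine ⟨_, rfl, rfl, ?_⟩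
  have hlen1 := (tab_len k m).1
  show _ = (Tab k (m+1)).1.getD (m+1) 0
  rw [show (Tab k (m+1)).1 = (Tab k m).1 ++ [_] from rfl,
      List.getD_eq_getElem?_getD, List.getElem?_append_right (by omega)]
  simp [hlen1]

lemma tab1_getD (k : Int) (n j : Nat) (hj : j ≤ n) : (Tab k n).1.getD j 0 = fv k j := by
  induction n with
  | zero => interval_cases j; rfl
  | succ m ih =>
    obtain ⟨B, h1, _, hB⟩ := tab_succ k m
    have hlen := (tab_len k m).1
    rcases Nat.lt_or_ge j (m + 1) with h | h
    · rw [h1, List.getD_eq_getElem?_getD, List.getElem?_append_left (by omega),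
          ← List.getD_eq_getElem?_getD]
      exact ih (by omega)
    · have hj' : j = m + 1 := by omega
      subst hj'
      rw [h1, List.getD_eq_getElem?_getD, List.getElem?_append_right (by omega)]
      simp [hlen, hB]

lemma tab2_getD (k : Int) (n : Nat) : ∀ t : Nat, t ≤ n → (Tab k n).2.getD t 0 = pS k t := by
  induction n with
  | zero => intro t ht; interval_cases t; simp [Tab, pS]
  | succ m ih =>
    intro t ht
    obtain ⟨B, _, h2, hB⟩ := tab_succ k m
    have hlen2 := (tab_len k m).2
    rcases Nat.lt_or_ge t (m + 1) with h | h
    · rw [h2, List.getD_eq_getElem?_getD, List.getElem?_append_left (by omega),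
          ← List.getD_eq_getElem?_getD]
      exact ih t (by omega)
    · have ht' : t = m + 1 := by omega
      subst ht'
      have hne : (Tab k m).2 ≠ [] := by
        intro h0; rw [h0] at hlen2; simp at hlen2
      rw [h2, List.getD_eq_getElem?_getD, List.getElem?_append_right (by omega), hlen2,
          show m + 1 - (m + 1) = 0 by omega]
      simp only [List.getElem?_cons_zero, Option.getD_some]
      rw [PySem.List.pyGetD_neg_one _ _ hne, hB]
      have hlast : (Tab k m).2.getLast hne = (Tab k m).2.getD m 0 := by
        rw [List.getLast_eq_getElem, List.getD_eq_getElem?_getD]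
        simp [hlen2]
      rw [hlast, ih m (le_refl m)]
      simp [pS, List.range_succ]

-- the best value of step m+1, written out via the prefix sums
lemma fv_succ_eq_best (k : Int) (m : Nat) :
    fv k (m + 1) = (PySem.List.pyRange 0 ((m : Int) + 1) 1).foldl (fun best i =>
      let t := (m : Int) + 1 - i - k
      let cand := i + (if 0 < t then PySem.List.pyGetD (Tab k m).2 t 0 else 0)
      if best < cand then cand else best) 0 := by
  have hlen := (tab_len k m).1
  show ((Tab k m).1 ++ [_]).getD (m + 1) 0 = _
  rw [List.getD_eq_getElem?_getD, List.getElem?_append_right (by omega)]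
  simp [hlen]

lemma sum_rev (k : Int) (T : Nat) :
    ((List.range T).map (fun r => fv k (T - r))).sum = pS k T := by
  induction T with
  | zero => simp [pS]
  | succ T ih =>
    rw [List.range_succ_eq_map]
    simp only [List.map_cons, List.map_map, List.sum_cons]
    have h1 : ((List.range T).map ((fun r => fv k (T + 1 - r)) ∘ (fun i => i + 1))).sum
        = pS k T := by
      rw [← ih]; congr 1; apply List.map_congr_left
      intro r hr; simp only [Function.comp]; congr 1; omega
    rw [h1, show T + 1 - 0 = T + 1 by omega]
    simp [pS, List.range_succ]; ring

lemma solgoA_eq_fv (k : Int) (hk : 1 ≤ k) :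
    ∀ n : Nat, ∀ houses : List Int, houses.length = n → ∀ fu : Nat, n < fu →
      solgoA fu houses k = fv k n := by
  intro n
  induction n using Nat.strong_induction_on with
  | _ n ih =>
    intro houses hlen fu hfu
    obtain ⟨f', rfl⟩ : ∃ f', fu = f' + 1 := ⟨fu - 1, by omega⟩
    rcases n with _ | m
    · have : houses = [] := List.length_eq_zero_iff.mp hlen
      subst this
      simp [solgoA, PySem.List.pyRange_one_eq_nil, fv, Tab]
    · rw [fv_succ_eq_best]
      simp only [solgoA, hlen]
      rw [show ((m + 1 : Nat) : Int) = (m : Int) + 1 by push_cast; ring]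
      apply PySem.List.foldl_congr_mem
      intro acc i hi
      rw [PySem.List.mem_pyRange_one] at hi
      have hc : (PySem.List.pyRange (i + k) ((m : Int) + 1) 1).foldl
            (fun cs j => cs + solgoA f' (PySem.List.slice houses (some j) none) k) i
          = i + (if 0 < (m : Int) + 1 - i - k
                 then PySem.List.pyGetD (Tab k m).2 ((m : Int) + 1 - i - k) 0 else 0) := by
        have hinner : ∀ cs : Int, ∀ j, j ∈ PySem.List.pyRange (i + k) ((m : Int) + 1) 1 →
            cs + solgoA f' (PySem.List.slice houses (some j) none) k
              = cs + fv k (m + 1 - j.toNat) := by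
          intro cs j hj
          rw [PySem.List.mem_pyRange_one] at hj
          congr 1
          rw [show j = ((j.toNat : Nat) : Int) by omega, PySem.List.slice_from_natCast]
          exact ih (m + 1 - j.toNat) (by omega) _ (by rw [List.length_drop, hlen]) f' (by omega)
        rw [PySem.List.foldl_congr_mem _ _ _ _ hinner,
            PySem.List.foldl_add _ (fun j : Int => fv k (m + 1 - j.toNat)) i]
        by_cases ht : 0 < (m : Int) + 1 - i - k
        · simp only [ht, if_true]
          congr 1
          have htT : ((m : Int) + 1 - i - k).toNat ≤ m := by omega
          rw [PySem.List.pyGetD_of_nonneg _ _ (by omega), tab2_getD k m _ htT,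
              PySem.List.pyRange_one]
          set T : Nat := ((m : Int) + 1 - i - k).toNat with hT
          rw [show ((m : Int) + 1 - (i + k)).toNat = T by omega, List.map_map]
          have hmap : (List.range T).map
                ((fun j => fv k (m + 1 - j.toNat)) ∘ (fun r : Nat => i + k + (r : Int)))
              = (List.range T).map (fun r => fv k (T - r)) := by
            apply List.map_congr_left
            intro r hr
            rw [List.mem_range] at hr
            simp only [Function.comp]
            congr 1; omega
          rw [hmap, sum_rev]
        · simp only [ht, if_false]
          rw [PySem.List.pyRange_one_eq_nil (by omega)]
          simp
      rw [hc]

-- ===== VERDICT (by name: the statement is the Claim_ definition above) =====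
theorem solution_spec : Claim_equal_solution := by
  intro houses k _ hPre
  show solution houses k = solution_alt houses k
  rcases hPre with hk | hemp
  · show solgoA (houses.length + 1) houses k =
      PySem.List.pyGetD ((PySem.List.pyRange 1 ((houses.length : Int) + 1) 1).foldl
        (bStep k) ([0], [0])).1 (houses.length : Int) 0
    rw [fold_eq_tab k houses.length,
        solgoA_eq_fv k hk houses.length houses rfl (houses.length + 1) (by omega),
        PySem.List.pyGetD_natCast]
    exact (tab1_getD k houses.length houses.length (le_refl _)).symm
  · subst hemp
    show solgoA 1 [] k =
      PySem.List.pyGetD ((PySem.List.pyRange 1 ((0 : Int) + 1) 1).foldl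
        (bStep k) ([0], [0])).1 (0 : Int) 0
    rw [show ((0 : Int) + 1) = (1 : Int) by ring, PySem.List.pyRange_one_eq_nil (by omega)]
    simp only [solgoA, List.foldl_nil]
    rw [show (([] : List Int).length : Int) = (0 : Int) by simp,
        PySem.List.pyRange_one_eq_nil (by omega)]
    simp [PySem.List.pyGetD]
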